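-- pv_equiv track=rewrite | github.com/MirageInc/Personal | Tree(3).py | f
-- ===== SOURCE A (Python) =====
-- def f(l): # The number of Caitlyn's ways of buying bicycles.
--     nl = []
--     for i in range(0, len(l)):
--         if i == len(l)-1:
--             nl.append(1)
--         else:
--             nl.append(l[i]+l[i+1])
--     nnl = []
--     for j in range(0, len(nl)):
--         if j == 0:
--             nnl.append(nl[0])
--         else:
--             nnl.append(nl[j]+nl[j-1])
--     if len(nnl) < 5:
--         nnl.append(1)
--     l = nnl
--     return nnl
-- ===== SOURCE B (Python) =====
-- def f(l):
--     res = []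
--     prev = 0
--     for i in range(len(l)):
--         cur = 1 if i == len(l) - 1 else l[i] + l[i + 1]
--         res.append(cur if i == 0 else cur + prev)
--         prev = cur
--     if len(res) < 5:
--         res.append(1)
--     return res
-- ===== Notes on version B (the rewrite author's own statement) =====
-- stated objective: simpler
-- what changed: Fuses A's two list-building passes into one loop that keeps only the previous intermediate value, eliminating the nl list entirely.
import Mathlib
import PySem

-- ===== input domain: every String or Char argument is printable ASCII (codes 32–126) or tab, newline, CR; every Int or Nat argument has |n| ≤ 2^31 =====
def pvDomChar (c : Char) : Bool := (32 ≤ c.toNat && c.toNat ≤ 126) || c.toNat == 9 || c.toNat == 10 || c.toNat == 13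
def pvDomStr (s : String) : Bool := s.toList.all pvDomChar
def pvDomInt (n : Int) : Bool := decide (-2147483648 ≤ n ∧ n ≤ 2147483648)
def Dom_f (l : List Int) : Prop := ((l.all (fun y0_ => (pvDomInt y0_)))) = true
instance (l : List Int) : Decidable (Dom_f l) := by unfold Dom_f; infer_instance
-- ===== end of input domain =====

-- B fuses A's two list-building passes into one loop carrying only the previous value (objective: simpler).

-- ===== PORT A =====
def f (l : List Int) : List Int :=
  let nl := (PySem.List.pyRange 0 l.length 1).foldl
    (fun nl i => nl ++ [if i = (l.length : Int) - 1 then 1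
                        else PySem.List.pyGetD l i 0 + PySem.List.pyGetD l (i + 1) 0]) []
  let nnl := (PySem.List.pyRange 0 nl.length 1).foldl
    (fun nnl j => nnl ++ [if j = 0 then PySem.List.pyGetD nl 0 0
                          else PySem.List.pyGetD nl j 0 + PySem.List.pyGetD nl (j - 1) 0]) []
  if nnl.length < 5 then nnl ++ [1] else nnl

-- ===== PORT B =====
def f_alt (l : List Int) : List Int :=
  let st := (PySem.List.pyRange 0 l.length 1).foldl
    (fun (st : List Int × Int) i =>
      let cur := if i = (l.length : Int) - 1 then 1
                 else PySem.List.pyGetD l i 0 + PySem.List.pyGetD l (i + 1) 0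
      (st.1 ++ [if i = 0 then cur else cur + st.2], cur)) ([], 0)
  let res := st.1
  if res.length < 5 then res ++ [1] else res

-- ===== PRECONDITION & SPEC =====
def Spec_f (l : List Int) (out : List Int) : Prop := out = f_alt l
instance (l : List Int) (out : List Int) : Decidable (Spec_f l out) := by unfold Spec_f; infer_instance

-- ===== CLAIM (what is proved, stated in full; the proofs are below) =====
def Claim_equal_f : Prop := ∀ (l : List Int), Dom_f l → Spec_f l (f l)

-- ===== LEMMAS AND PROOFS =====

-- B's fused fold, for an arbitrary per-index value g : state = (A's second-pass list, last g)
theorem fuse_fold (g : Int → Int) (n : Nat) :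
    ((PySem.List.pyRange 0 n 1).foldl
      (fun (st : List Int × Int) i =>
        (st.1 ++ [if i = 0 then g i else g i + st.2], g i)) ([], 0)) =
    ((PySem.List.pyRange 0 n 1).map (fun j => if j = 0 then g j else g j + g (j - 1)),
     if n = 0 then 0 else g ((n : Int) - 1)) := by
  induction n with
  | zero => simp [PySem.List.pyRange_one_eq_nil]
  | succ n ih =>
    have h : PySem.List.pyRange 0 ((n + 1 : Nat) : Int) 1
        = PySem.List.pyRange 0 (n : Int) 1 ++ [(n : Int)] := by
      push_cast
      exact PySem.List.pyRange_one_succ_right (by exact_mod_cast Nat.zero_le n)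
    rw [h, List.foldl_append, ih, List.map_append]
    rcases Nat.eq_zero_or_pos n with h0 | h0
    · subst h0; simp
    · have hne : n ≠ 0 := by omega
      simp [hne]

theorem f_alt_eq (l : List Int) : f l = f_alt l := by
  unfold f f_alt
  dsimp only
  set g : Int → Int := fun i =>
    if i = (l.length : Int) - 1 then 1
    else PySem.List.pyGetD l i 0 + PySem.List.pyGetD l (i + 1) 0 with hg
  have hnl : (PySem.List.pyRange 0 l.length 1).foldl
      (fun nl i => nl ++ [if i = (l.length : Int) - 1 then 1
                          else PySem.List.pyGetD l i 0 + PySem.List.pyGetD l (i + 1) 0]) []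
      = (PySem.List.pyRange 0 l.length 1).map g := by
    rw [hg]; exact PySem.List.foldl_append_singleton_eq_map _ _ _
  rw [hnl]
  set nl := (PySem.List.pyRange 0 l.length 1).map g with hnldef
  have hlen : (nl.length : Int) = (l.length : Int) := by
    simp [hnldef, PySem.List.length_pyRange_one]
  have hnnl : (PySem.List.pyRange 0 nl.length 1).foldl
      (fun nnl j => nnl ++ [if j = 0 then PySem.List.pyGetD nl 0 0
                            else PySem.List.pyGetD nl j 0 + PySem.List.pyGetD nl (j - 1) 0]) []
      = (PySem.List.pyRange 0 l.length 1).map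
          (fun j => if j = 0 then g j else g j + g (j - 1)) := by
    rw [PySem.List.foldl_append_singleton_eq_map]
    have : (nl.length : Int) = (l.length : Int) := hlen
    rw [this]
    simp only [List.nil_append]
    apply List.map_congr_left
    intro j hj
    rw [PySem.List.mem_pyRange_one] at hj
    have hjn : j < (l.length : Int) := hj.2
    have hj0 : 0 ≤ j := hj.1
    by_cases hz : j = 0
    · subst hz
      simp [hnldef, PySem.List.pyGetD_map_pyRange_of_nonneg g (l.length : Int) 0 0 le_rfl hjn]
    · have h1 : PySem.List.pyGetD nl j 0 = g j := by
        rw [hnldef]; exact PySem.List.pyGetD_map_pyRange_of_nonneg g _ j 0 hj0 hjn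
      have h2 : PySem.List.pyGetD nl (j - 1) 0 = g (j - 1) := by
        rw [hnldef]
        exact PySem.List.pyGetD_map_pyRange_of_nonneg g _ (j - 1) 0 (by omega) (by omega)
      simp [hz, h1, h2]
  rw [hnnl]
  have hB : (PySem.List.pyRange 0 l.length 1).foldl
      (fun (st : List Int × Int) i =>
        (st.1 ++ [if i = 0 then g i else g i + st.2], g i)) ([], 0)
      = ((PySem.List.pyRange 0 l.length 1).map
          (fun j => if j = 0 then g j else g j + g (j - 1)),
         if l.length = 0 then 0 else g ((l.length : Int) - 1)) :=
    fuse_fold g l.length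
  simp only [hg] at hB ⊢
  rw [hB]

-- ===== VERDICT (by name: the statement is the Claim_ definition above) =====
theorem f_spec : Claim_equal_f := by
  intro l _
  unfold Spec_f
  exact f_alt_eq l
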